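-- pv_equiv track=rewrite | github.com/spice-herald/pytesdaq | pytesdaq/utils/arg_utils.py | build_range_str
-- ===== SOURCE A (Python) =====
-- def build_range_str(data_list):
--     """
--     Takes a list of numbers between a and b inclusive and build a string with
--     comma separated ranges like "a-b,c-d,f", numbers from a to b, a to d and f
--     """
--     data_list.sort()
--     units = []
--     prev_val = data_list[0]
--
--     for val in data_list:
--         if val == prev_val+1:
--             units[-1].append(val)
--         else:
--             units.append([val])
--         prev_val = val
--
--     return '_'.join(['{0}-{1}'.format(u[0],u[-1]) if len(u)>1 else str(u[0]) for u in  units])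
-- ===== SOURCE B (Python) =====
-- def build_range_str(data_list):
--     """Staged-passes reimplementation: sort in place like A, then compute the
--     run-boundary INDEX list (positions where the consecutive step breaks),
--     then format each run from its boundary pair via zip.  Raises IndexError
--     on the empty list, like A."""
--     data_list.sort()
--     n = len(data_list)
--     breaks = [0] + [i for i in range(1, n) if data_list[i] != data_list[i - 1] + 1] + [n]
--     parts = ['{0}-{1}'.format(data_list[lo], data_list[hi - 1]) if hi - lo > 1
--              else str(data_list[lo])
--              for lo, hi in zip(breaks, breaks[1:])]
--     return '_'.join(parts)
-- ===== Notes on version B (the rewrite author's own statement) =====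
-- stated objective: alternative
-- what changed: Replaces A's single fold that grows a list-of-lists accumulator (appending to units[-1]) by staged passes over the sorted list: first a filtered range computes the list of run-boundary indices, then adjacent boundary pairs (via zip) are formatted directly from the endpoints data_list[lo] and data_list[hi-1]; Pre_ excludes the empty list, on which both A and B raise IndexError.
import Mathlib
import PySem

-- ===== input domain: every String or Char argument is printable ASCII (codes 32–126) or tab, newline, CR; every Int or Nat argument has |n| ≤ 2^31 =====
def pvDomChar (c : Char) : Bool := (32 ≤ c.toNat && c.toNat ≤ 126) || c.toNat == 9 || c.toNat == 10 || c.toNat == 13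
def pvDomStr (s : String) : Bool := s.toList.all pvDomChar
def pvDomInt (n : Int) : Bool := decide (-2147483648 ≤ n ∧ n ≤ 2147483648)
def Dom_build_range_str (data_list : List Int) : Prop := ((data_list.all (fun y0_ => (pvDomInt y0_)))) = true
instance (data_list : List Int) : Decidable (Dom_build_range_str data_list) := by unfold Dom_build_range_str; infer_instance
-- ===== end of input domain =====

-- B replaces A's fold that grows a list-of-lists accumulator by staged passes: first compute the
-- run-boundary INDEX list with a filtered range, then format each run from adjacent boundary
-- pairs (objective: alternative; both sort data_list in place).


-- ===== PORT A =====
-- loop body: if val == prev_val+1: units[-1].append(val) else: units.append([val]); prev_val = val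
-- (units[-1] on empty units would raise in Python; that state is unreachable since the very first
-- iteration takes the else branch — getLastD/dropLast only touch the nonempty-units case)
def pvAStep (st : List (List Int) × Int) (val : Int) : List (List Int) × Int :=
  if val = st.2 + 1 then (st.1.dropLast ++ [st.1.getLastD [] ++ [val]], val)
  else (st.1 ++ [[val]], val)

-- '{0}-{1}'.format(u[0],u[-1]) if len(u)>1 else str(u[0])  (every u is nonempty by construction)
def pvAFmt (u : List Int) : String :=
  if u.length > 1 then PySem.Int.toStr (u.headD 0) ++ "-" ++ PySem.Int.toStr (u.getLastD 0)
  else PySem.Int.toStr (u.headD 0)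

def build_range_str (data_list : List Int) : String :=
  let s := PySem.List.sorted data_list (fun x => x) false
  match PySem.List.pyGet? s 0 with
  | none => ""   -- Python raises IndexError on the empty list; excluded by Pre_build_range_str
  | some prev0 =>
    PySem.Str.join "_" (((s.foldl pvAStep ([], prev0)).1).map pvAFmt)

-- ===== PORT B =====
-- '{0}-{1}'.format(data_list[lo], data_list[hi-1]) if hi-lo > 1 else str(data_list[lo])
-- (pyGetD: under Pre_ every index reached here is in range; Python's empty-list IndexError
-- case is excluded by Pre_build_range_str)
def pvBFmt (s : List Int) (p : Int × Int) : String :=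
  if p.2 - p.1 > 1 then
    PySem.Int.toStr (PySem.List.pyGetD s p.1 0) ++ "-" ++ PySem.Int.toStr (PySem.List.pyGetD s (p.2 - 1) 0)
  else PySem.Int.toStr (PySem.List.pyGetD s p.1 0)

def build_range_str_alt (data_list : List Int) : String :=
  let s := PySem.List.sorted data_list (fun x => x) false
  let n : Int := (s.length : Int)
  let breaks : List Int :=
    [0] ++ (PySem.List.pyRange 1 n 1).filter
             (fun i => PySem.List.pyGetD s i 0 != PySem.List.pyGetD s (i - 1) 0 + 1) ++ [n]
  PySem.Str.join "_" ((breaks.zip breaks.tail).map (pvBFmt s))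

-- ===== PRECONDITION & SPEC =====
-- Pre_ excludes only the empty list, on which A raises IndexError (data_list[0]); B raises there too.
def Pre_build_range_str (data_list : List Int) : Prop := data_list ≠ []
instance (data_list : List Int) : Decidable (Pre_build_range_str data_list) := by
  unfold Pre_build_range_str; infer_instance
def pvWitness_build_range_str : List Int := ([3, 1, 2, 7])

def Spec_build_range_str (data_list : List Int) (out : String) : Prop := out = build_range_str_alt data_list
instance (data_list : List Int) (out : String) : Decidable (Spec_build_range_str data_list out) := by unfold Spec_build_range_str; infer_instance

-- ===== CLAIM (what is proved, stated in full; the proofs are below) =====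
def Claim_equal_build_range_str : Prop := ∀ (data_list : List Int), Dom_build_range_str data_list → Pre_build_range_str data_list → Spec_build_range_str data_list (build_range_str data_list)

-- ===== LEMMAS AND PROOFS =====

-- common recursive description of the parts list: one entry per maximal consecutive run
def pvEmit (start cur : Int) : String :=
  if start = cur then PySem.Int.toStr start
  else PySem.Int.toStr start ++ "-" ++ PySem.Int.toStr cur

def pvBGo (start cur : Int) : List Int → List String
  | [] => [pvEmit start cur]
  | val :: rest =>
    if val = cur + 1 then pvBGo start val rest
    else pvEmit start cur :: pvBGo val val rest

-- ---- A side: the fold over runs ----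
def pvRun (a b : Int) : List Int := (List.range (b - a + 1).toNat).map (fun i => a + i)

theorem pvRun_self (a : Int) : pvRun a a = [a] := by
  simp [pvRun]

theorem pvRun_length {a b : Int} : (pvRun a b).length = (b - a + 1).toNat := by
  simp [pvRun]

theorem pvRun_snoc {a b : Int} (h : a ≤ b) : pvRun a b ++ [b + 1] = pvRun a (b + 1) := by
  have h1 : (b + 1 - a + 1).toNat = (b - a + 1).toNat + 1 := by omega
  have h2 : a + ((b - a + 1).toNat : Int) = b + 1 := by omega
  simp [pvRun, h1, List.range_succ]
  omega

theorem pvRun_headD {a b : Int} (h : a ≤ b) : (pvRun a b).headD 0 = a := by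
  have : (b - a + 1).toNat = (b - a).toNat + 1 := by omega
  simp [pvRun, this, List.range_succ_eq_map]

theorem pvRun_getLastD {a b : Int} (h : a ≤ b) : (pvRun a b).getLastD 0 = b := by
  have h1 : (b - a + 1).toNat = (b - a).toNat + 1 := by omega
  have h2 : a + ((b - a).toNat : Int) = b := by omega
  rw [pvRun, h1, List.range_succ]
  simp
  omega

theorem pvAFmt_run {a b : Int} (h : a ≤ b) : pvAFmt (pvRun a b) = pvEmit a b := by
  unfold pvAFmt pvEmit
  rw [pvRun_headD h, pvRun_getLastD h, pvRun_length]
  by_cases hab : a = b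
  · subst hab; simp
  · have : (b - a + 1).toNat > 1 := by omega
    simp [this, hab]

-- loop invariant: A's state is (done ++ [current run a..b], b); the rest of the fold produces
-- exactly the parts pvBGo emits for the remaining values
theorem pvLoop (rest : List Int) : ∀ (done : List (List Int)) (a b : Int), a ≤ b →
    ((List.foldl pvAStep (done ++ [pvRun a b], b) rest).1).map pvAFmt
      = done.map pvAFmt ++ pvBGo a b rest := by
  induction rest with
  | nil =>
    intro done a b hab
    simp [pvBGo, pvAFmt_run hab]
  | cons val rest ih =>
    intro done a b hab
    simp only [List.foldl_cons, pvBGo]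
    by_cases hv : val = b + 1
    · have hstep : pvAStep (done ++ [pvRun a b], b) val = (done ++ [pvRun a (b + 1)], b + 1) := by
        simp [pvAStep, hv, pvRun_snoc hab]
      rw [hstep, if_pos hv, hv, ih done a (b + 1) (by omega)]
    · have hstep : pvAStep (done ++ [pvRun a b], b)
          val = ((done ++ [pvRun a b]) ++ [pvRun val val], val) := by
        simp [pvAStep, hv, pvRun_self]
      rw [hstep, if_neg hv, ih (done ++ [pvRun a b]) val val le_rfl]
      simp [pvAFmt_run hab]

-- ---- B side: zip of adjacent break indices ----
-- pairing a list with its tail, formatted, as a simple recursion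
def pvG (s : List Int) (lo : Int) : List Int → List String
  | [] => []
  | hi :: L => pvBFmt s (lo, hi) :: pvG s hi L

theorem pvZip_g (s : List Int) : ∀ (L : List Int) (lo : Int),
    (((lo :: L).zip L).map (pvBFmt s)) = pvG s lo L := by
  intro L
  induction L with
  | nil => intro lo; simp [pvG]
  | cons hi L ih => intro lo; simp [pvG, List.zip_cons_cons, ← ih hi]

-- inside a consecutive run, the value at offset d from lo is s[lo] + d
theorem pvRunVal (s : List Int) (d : Nat) : ∀ (lo : Int),
    (∀ k : Int, lo ≤ k → k < lo + d → PySem.List.pyGetD s (k + 1) 0 = PySem.List.pyGetD s k 0 + 1) →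
    PySem.List.pyGetD s (lo + d) 0 = PySem.List.pyGetD s lo 0 + d := by
  induction d with
  | zero => intro lo _; simp
  | succ d ih =>
    intro lo h
    have h1 := h (lo + d) (by omega) (by push_cast; omega)
    have h2 := ih lo (fun k hk1 hk2 => h k hk1 (by push_cast at hk2 ⊢; omega))
    push_cast
    push_cast at h1 h2
    rw [show lo + ((d : Int) + 1) = (lo + d) + 1 by ring, h1, h2]
    ring

-- a break-pair (lo, j) formats to exactly pvEmit of the run's endpoint values
theorem pvFmt_emit (s : List Int) (lo j : Int) (hlj : lo < j)
    (hrun : ∀ k : Int, lo ≤ k → k < j - 1 → PySem.List.pyGetD s (k + 1) 0 = PySem.List.pyGetD s k 0 + 1) :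
    pvBFmt s (lo, j) = pvEmit (PySem.List.pyGetD s lo 0) (PySem.List.pyGetD s (j - 1) 0) := by
  have hd : lo + (((j - 1 - lo).toNat : Nat) : Int) = j - 1 := by omega
  have hv := pvRunVal s (j - 1 - lo).toNat lo
    (fun k hk1 hk2 => hrun k hk1 (by omega))
  rw [hd] at hv
  unfold pvBFmt pvEmit
  by_cases h1 : j - lo > 1
  · have : (((j - 1 - lo).toNat : Nat) : Int) ≠ 0 := by omega
    have hne : PySem.List.pyGetD s lo 0 ≠ PySem.List.pyGetD s (j - 1) 0 := by
      rw [hv]; omega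
    simp [h1, hne]
  · have h2 : j - 1 = lo := by omega
    have : (((j - 1 - lo).toNat : Nat) : Int) = 0 := by omega
    rw [this] at hv
    simp [h1, h2]

-- main B-side invariant: from break index j, with the current run spanning indices [lo, j-1],
-- the remaining break list formats to exactly pvBGo's output for the remaining values
theorem pvMain (m : Nat) : ∀ (s : List Int) (j lo : Int),
    ((s.length : Int) - j).toNat = m → 0 ≤ lo → lo < j → j ≤ (s.length : Int) →
    (∀ k : Int, lo ≤ k → k < j - 1 → PySem.List.pyGetD s (k + 1) 0 = PySem.List.pyGetD s k 0 + 1) →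
    pvG s lo ((PySem.List.pyRange j (s.length : Int) 1).filter
        (fun i => PySem.List.pyGetD s i 0 != PySem.List.pyGetD s (i - 1) 0 + 1) ++ [((s.length : Int))])
      = pvBGo (PySem.List.pyGetD s lo 0) (PySem.List.pyGetD s (j - 1) 0) (s.drop j.toNat) := by
  induction m with
  | zero =>
    intro s j lo hm h0 hlj hjn hrun
    have hj : j = (s.length : Int) := by omega
    subst hj
    rw [PySem.List.pyRange_one_eq_nil le_rfl]
    have hdrop : s.drop ((s.length : Int)).toNat = [] := by simp
    rw [hdrop]
    simp only [List.filter_nil, List.nil_append, pvG, pvBGo]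
    rw [pvFmt_emit s lo _ hlj hrun]
  | succ m ih =>
    intro s j lo hm h0 hlj hjn hrun
    have hj : j < (s.length : Int) := by omega
    rw [PySem.List.pyRange_one_cons hj]
    have hjnat : j.toNat < s.length := by omega
    have hdrop : s.drop j.toNat = s[j.toNat] :: s.drop (j.toNat + 1) :=
      List.drop_eq_getElem_cons hjnat
    have hgj : PySem.List.pyGetD s j 0 = s[j.toNat] :=
      PySem.List.pyGetD_eq_getElem s 0 (by omega) (by exact_mod_cast hj)
    have htn : (j + 1).toNat = j.toNat + 1 := by omega
    rw [hdrop, List.filter_cons]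
    by_cases hp : PySem.List.pyGetD s j 0 = PySem.List.pyGetD s (j - 1) 0 + 1
    · -- no break at j: the run continues
      have hb : (PySem.List.pyGetD s j 0 != PySem.List.pyGetD s (j - 1) 0 + 1) = false := by
        simp [hp]
      simp only [hb, Bool.false_eq_true, if_false, pvBGo]
      rw [if_pos (by rw [← hgj]; exact hp)]
      have := ih s (j + 1) lo (by omega) h0 (by omega) (by omega)
        (fun k hk1 hk2 => by
          by_cases hk : k < j - 1
          · exact hrun k hk1 hk
          · have : k = j - 1 := by omega
            subst this
            rw [show j - 1 + 1 = j by ring, hp])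
      rw [show j + 1 - 1 = j by ring, htn] at this
      rw [← hgj]
      exact this
    · -- break at j: emit the finished run, start a new one at j
      have hb : (PySem.List.pyGetD s j 0 != PySem.List.pyGetD s (j - 1) 0 + 1) = true := by
        simp [hp]
      simp only [hb, if_true, List.cons_append, pvG, pvBGo]
      rw [if_neg (by rw [hgj] at hp; exact hp)]
      have := ih s (j + 1) j (by omega) (by omega) (by omega) (by omega)
        (fun k hk1 hk2 => absurd hk2 (by omega))
      rw [show j + 1 - 1 = j by ring, htn] at this
      rw [pvFmt_emit s lo j hlj hrun, ← hgj]
      exact congrArg _ this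

-- ===== VERDICT (by name: the statement is the Claim_ definition above) =====
theorem build_range_str_spec : Claim_equal_build_range_str := by
  intro data_list _ hpre
  unfold Spec_build_range_str build_range_str build_range_str_alt
  cases hs : PySem.List.sorted data_list (fun x => x) false with
  | nil => exact absurd ((PySem.List.sorted_eq_nil_iff _ _ _).1 hs) hpre
  | cons x rest =>
    have hgo : PySem.List.pyGet? (x :: rest) 0 = some x := PySem.List.pyGet?_zero_cons x rest
    dsimp only
    rw [hgo]
    -- A side: first fold step, then the loop invariant pvLoop
    have hA : (((x :: rest).foldl pvAStep ([], x)).1).map pvAFmt = pvBGo x x rest := by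
      have hstep0 : pvAStep ([], x) x = ([] ++ [pvRun x x], x) := by
        simp [pvAStep, pvRun_self]
      rw [List.foldl_cons, hstep0, pvLoop rest [] x x le_rfl]
      simp
    -- B side: breaks pairing (pvZip_g), then the invariant pvMain at j = 1, lo = 0
    have hB := pvMain rest.length (x :: rest) 1 0 (by simp) le_rfl (by norm_num)
      (by simp) (fun k hk1 hk2 => absurd hk2 (by omega))
    have hz := pvZip_g (x :: rest)
      ((PySem.List.pyRange 1 (((x :: rest).length : Nat) : Int) 1).filter
          (fun i => PySem.List.pyGetD (x :: rest) i 0 != PySem.List.pyGetD (x :: rest) (i - 1) 0 + 1)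
        ++ [(((x :: rest).length : Nat) : Int)]) 0
    norm_num [PySem.List.pyGetD_zero_cons, Int.toNat_one, List.drop_one, List.tail_cons] at hB
    show PySem.Str.join "_" (List.map pvAFmt (List.foldl pvAStep ([], x) (x :: rest)).1) = _
    rw [hA]
    simp only [List.nil_append, List.cons_append, List.tail_cons] at hz ⊢
    rw [hz]
    simp only [List.length_cons, Nat.cast_add, Nat.cast_one]
    rw [hB]
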